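-- pv_equiv track=rewrite | github.com/pypi-data/pypi-mirror-345 | packages/aqgo/aqgo-0.1.12.tar.gz/aqgo-0.1.12/aletheia_quantum_genetic_optimizers/reproduction_methods/__init__.py | divide_ids_into_clusters_with_coords
-- ===== SOURCE A (Python) =====
-- from typing import List, Literal, Dict
--
-- def divide_ids_into_clusters_with_coords(ordered_ids: List, id_to_coords: Dict, min_size: int = 2, max_size: int = 5):
--     """
--     Divide una lista de IDs en grupos de entre min_size y max_size,
--     mapeando cada ID a sus coordenadas desde un diccionario dado.
--
--     :param ordered_ids: Lista ordenada de IDs a agrupar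
--     :param id_to_coords: Diccionario con {id: (x, y)}
--     :param min_size: Tamaño mínimo de grupo
--     :param max_size: Tamaño máximo de grupo
--     :return: Diccionario con clusters numerados y coordenadas mapeadas
--     """
--     total = len(ordered_ids)
--     i = 0
--     cluster_idx = 0
--     clusters = {}
--
--     while i < total:
--         restante = total - i
--
--         if min_size <= restante <= max_size:
--             ids = ordered_ids[i:]
--             clusters[cluster_idx] = {idx: id_to_coords[idx] for idx in ids}
--             break
--
--         if restante < min_size:
--             if clusters:
--                 for idx in ordered_ids[i:]:
--                     clusters[cluster_idx - 1][idx] = id_to_coords[idx]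
--             else:
--                 clusters[cluster_idx] = {idx: id_to_coords[idx] for idx in ordered_ids[i:]}
--             break
--
--         for tam in range(max_size, min_size - 1, -1):
--             if (restante - tam) >= min_size or (restante - tam) == 0:
--                 ids = ordered_ids[i:i + tam]
--                 clusters[cluster_idx] = {idx: id_to_coords[idx] for idx in ids}
--                 i += tam
--                 cluster_idx += 1
--                 break
--
--     return clusters
-- ===== SOURCE B (Python) =====
-- def divide_ids_into_clusters_with_coords(ordered_ids, id_to_coords, min_size=2, max_size=5):
--     # Two-pass re-implementation: first decide the cluster sizes arithmetically
--     # (no inner range scan), then slice ordered_ids once into consecutive blocks.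
--     total = len(ordered_ids)
--     sizes = []
--     rem = total
--     while rem > 0:
--         if min_size <= rem <= max_size:
--             sizes.append(rem)
--             rem = 0
--         elif rem < min_size:
--             if sizes:
--                 sizes[-1] += rem
--             else:
--                 sizes.append(rem)
--             rem = 0
--         else:
--             tam = min(max_size, rem - min_size)
--             if tam < min_size:
--                 break  # no admissible size exists (A never terminates here)
--             sizes.append(tam)
--             rem -= tam
--     clusters = {}
--     pos = 0
--     for k, sz in enumerate(sizes):
--         clusters[k] = {idx: id_to_coords[idx] for idx in ordered_ids[pos:pos + sz]}
--         pos += sz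
--     return clusters
-- ===== Notes on version B (the rewrite author's own statement) =====
-- stated objective: alternative
-- what changed: B is two-pass: it first computes the list of cluster sizes (choosing each size arithmetically as min(max_size, rem-min_size) instead of scanning range(max_size, min_size-1, -1), and folding a short tail into the last size numerically), then slices ordered_ids once into consecutive blocks; A interleaves sizing, slicing and dict mutation in one loop.
import Mathlib
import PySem

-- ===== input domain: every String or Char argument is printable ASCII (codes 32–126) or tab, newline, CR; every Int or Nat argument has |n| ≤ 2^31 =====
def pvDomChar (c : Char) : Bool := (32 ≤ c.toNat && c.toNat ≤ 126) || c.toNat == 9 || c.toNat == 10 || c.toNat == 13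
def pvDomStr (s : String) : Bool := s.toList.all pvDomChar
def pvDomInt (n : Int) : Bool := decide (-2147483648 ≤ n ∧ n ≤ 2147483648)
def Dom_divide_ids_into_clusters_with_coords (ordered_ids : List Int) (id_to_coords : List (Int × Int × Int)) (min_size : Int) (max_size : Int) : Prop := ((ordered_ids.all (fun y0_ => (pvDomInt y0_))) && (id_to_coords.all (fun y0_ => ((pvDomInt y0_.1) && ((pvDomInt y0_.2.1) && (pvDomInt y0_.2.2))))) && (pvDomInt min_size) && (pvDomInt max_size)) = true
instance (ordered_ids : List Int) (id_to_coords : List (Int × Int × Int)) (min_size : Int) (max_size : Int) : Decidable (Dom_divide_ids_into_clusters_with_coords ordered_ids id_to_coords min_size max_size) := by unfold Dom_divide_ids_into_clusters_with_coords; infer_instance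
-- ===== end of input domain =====

-- B replaces A's one-pass loop (inner range scan + dict mutation) by a sizes-then-slices two-pass
-- decomposition; equivalence is proved on the inputs where A returns (Pre_ below).

-- ===== PORT A =====

-- id_to_coords[idx]: first-match lookup in the association list; the `none` case is Python's
-- KeyError, excluded by Pre_ (the (0,0) default is never reached inside Pre_).
def pvLookup (m : List (Int × Int × Int)) (idx : Int) : Int × Int :=
  match m.find? (fun p => p.1 == idx) with
  | some p => p.2
  | none => (0, 0)

-- {idx: id_to_coords[idx] for idx in ids}
def pvDictOf (m : List (Int × Int × Int)) (ids : List Int) : PySem.Dict Int (Int × Int) :=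
  ids.foldl (fun d idx => d.insert idx (pvLookup m idx)) PySem.Dict.empty

-- A's while loop, state (i, cluster_idx, clusters); fuel ≥ total+1 suffices on Pre_.
-- On the `none` branch (the inner for finds no size) Python A loops forever — outside Pre_;
-- the port returns the current clusters there, as it does when fuel runs out.
def pvALoop (oids : List Int) (m : List (Int × Int × Int)) (mn mx : Int) :
    Nat → Int → Int → PySem.Dict Int (PySem.Dict Int (Int × Int)) →
    PySem.Dict Int (PySem.Dict Int (Int × Int))
  | 0, _, _, clusters => clusters
  | fuel + 1, i, cidx, clusters =>
    if i < (oids.length : Int) then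
      let restante := (oids.length : Int) - i
      if mn ≤ restante ∧ restante ≤ mx then
        clusters.insert cidx (pvDictOf m (PySem.List.slice oids (some i) none))
      else if restante < mn then
        if clusters.size ≠ 0 then
          (PySem.List.slice oids (some i) none).foldl
            (fun cl idx => cl.modify (cidx - 1) PySem.Dict.empty
              (fun dd => dd.insert idx (pvLookup m idx))) clusters
        else
          clusters.insert cidx (pvDictOf m (PySem.List.slice oids (some i) none))
      else
        match (PySem.List.pyRange mx (mn - 1) (-1)).find?
            (fun tam => decide (mn ≤ restante - tam ∨ restante - tam = 0)) with
        | some tam =>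
            pvALoop oids m mn mx fuel (i + tam) (cidx + 1)
              (clusters.insert cidx (pvDictOf m (PySem.List.slice oids (some i) (some (i + tam)))))
        | none => clusters
    else clusters

def divide_ids_into_clusters_with_coords (ordered_ids : List Int) (id_to_coords : List (Int × Int × Int)) (min_size : Int) (max_size : Int) : List (Int × List (Int × Int × Int)) :=
  (pvALoop ordered_ids id_to_coords min_size max_size (ordered_ids.length + 1) 0 0
    PySem.Dict.empty).items.map (fun p => (p.1, p.2.items))

-- ===== PORT B =====

-- pass 1: the list of cluster sizes (Source B's while loop); `tam < mn` is Source B's `break`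
def pvBSizes (mn mx : Int) : Nat → Int → List Int → List Int
  | 0, _, sizes => sizes
  | fuel + 1, rem, sizes =>
    if 0 < rem then
      if mn ≤ rem ∧ rem ≤ mx then sizes ++ [rem]
      else if rem < mn then
        match sizes.getLast? with
        | some t => sizes.dropLast ++ [t + rem]
        | none => [rem]
      else
        let tam := min mx (rem - mn)
        if tam < mn then sizes
        else pvBSizes mn mx fuel (rem - tam) (sizes ++ [tam])
    else sizes

-- pass 2: one step of Source B's `for k, sz in enumerate(sizes)` loop, state (clusters, pos)
def pvBStep (oids : List Int) (m : List (Int × Int × Int))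
    (st : PySem.Dict Int (PySem.Dict Int (Int × Int)) × Int) (p : Int × Int) :
    PySem.Dict Int (PySem.Dict Int (Int × Int)) × Int :=
  (st.1.insert p.1 (pvDictOf m (PySem.List.slice oids (some st.2) (some (st.2 + p.2)))), st.2 + p.2)

def pvBBuild (oids : List Int) (m : List (Int × Int × Int)) (sizes : List Int) :
    PySem.Dict Int (PySem.Dict Int (Int × Int)) :=
  ((PySem.List.enumerate sizes 0).foldl (pvBStep oids m) (PySem.Dict.empty, 0)).1

def divide_ids_into_clusters_with_coords_alt (ordered_ids : List Int) (id_to_coords : List (Int × Int × Int)) (min_size : Int) (max_size : Int) : List (Int × List (Int × Int × Int)) :=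
  (pvBBuild ordered_ids id_to_coords
    (pvBSizes min_size max_size (ordered_ids.length + 1) (ordered_ids.length : Int) [])).items.map
    (fun p => (p.1, p.2.items))

-- ===== PRECONDITION & SPEC =====

-- Pre_ excludes exactly the inputs on which Python A does not return: those raising KeyError
-- (an id of ordered_ids missing from id_to_coords) and those on which A's while loop never
-- terminates (no admissible cluster size ever found, e.g. max_size < min_size, or a remainder
-- stuck strictly between max_size and 2*min_size).
def Pre_divide_ids_into_clusters_with_coords (ordered_ids : List Int) (id_to_coords : List (Int × Int × Int)) (min_size : Int) (max_size : Int) : Prop :=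
  (∀ idx ∈ ordered_ids, idx ∈ id_to_coords.map Prod.fst) ∧
  ((ordered_ids.length : Int) = 0 ∨ (ordered_ids.length : Int) < min_size ∨
    (1 ≤ max_size ∧ (min_size ≤ 0 ∨ (ordered_ids.length : Int) ≤ max_size ∨
      ¬(max_size < min_size + PySem.Int.mod ((ordered_ids.length : Int) - min_size) max_size ∧
        min_size + PySem.Int.mod ((ordered_ids.length : Int) - min_size) max_size < 2 * min_size))))

instance (ordered_ids : List Int) (id_to_coords : List (Int × Int × Int)) (min_size : Int) (max_size : Int) : Decidable (Pre_divide_ids_into_clusters_with_coords ordered_ids id_to_coords min_size max_size) := by unfold Pre_divide_ids_into_clusters_with_coords; infer_instance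

def pvWitness_divide_ids_into_clusters_with_coords : List Int × (List (Int × Int × Int)) × Int × Int :=
  ([10, 20, 30, 40, 50, 60, 70], [(10, 1, 2), (20, 3, 4), (30, 5, 6), (40, 7, 8), (50, 9, 10), (60, 11, 12), (70, 13, 14)], 2, 5)

def Spec_divide_ids_into_clusters_with_coords (ordered_ids : List Int) (id_to_coords : List (Int × Int × Int)) (min_size : Int) (max_size : Int) (out : List (Int × List (Int × Int × Int))) : Prop := out = divide_ids_into_clusters_with_coords_alt ordered_ids id_to_coords min_size max_size
instance (ordered_ids : List Int) (id_to_coords : List (Int × Int × Int)) (min_size : Int) (max_size : Int) (out : List (Int × List (Int × Int × Int))) : Decidable (Spec_divide_ids_into_clusters_with_coords ordered_ids id_to_coords min_size max_size out) := by unfold Spec_divide_ids_into_clusters_with_coords; infer_instance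

-- ===== CLAIM (what is proved, stated in full; the proofs are below) =====
def Claim_equal_divide_ids_into_clusters_with_coords : Prop := ∀ (ordered_ids : List Int) (id_to_coords : List (Int × Int × Int)) (min_size : Int) (max_size : Int), Dom_divide_ids_into_clusters_with_coords ordered_ids id_to_coords min_size max_size → Pre_divide_ids_into_clusters_with_coords ordered_ids id_to_coords min_size max_size → Spec_divide_ids_into_clusters_with_coords ordered_ids id_to_coords min_size max_size (divide_ids_into_clusters_with_coords ordered_ids id_to_coords min_size max_size)

-- ===== LEMMAS AND PROOFS =====

theorem pvSnd_foldl (oids : List Int) (m : List (Int × Int × Int)) :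
    ∀ (l : List (Int × Int)) (st : PySem.Dict Int (PySem.Dict Int (Int × Int)) × Int),
      (l.foldl (pvBStep oids m) st).2 = st.2 + (l.map (·.2)).sum := by
  intro l
  induction l with
  | nil => intro st; simp
  | cons p l ih => intro st; simp [ih, pvBStep]; ring

theorem pvBBuild_append (oids : List Int) (m : List (Int × Int × Int)) (S : List Int) (t : Int) :
    pvBBuild oids m (S ++ [t]) =
      (pvBBuild oids m S).insert (S.length : Int)
        (pvDictOf m (PySem.List.slice oids (some S.sum) (some (S.sum + t)))) := by
  unfold pvBBuild
  rw [PySem.List.enumerate_append, List.foldl_append]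
  have h2 : ((PySem.List.enumerate S 0).foldl (pvBStep oids m) (PySem.Dict.empty, 0)).2 = S.sum := by
    rw [pvSnd_foldl]; simp [PySem.List.map_snd_enumerate]
  simp [PySem.List.enumerate, pvBStep, h2]

theorem pvKeys_bBuild (oids : List Int) (m : List (Int × Int × Int)) :
    ∀ (S : List Int), (pvBBuild oids m S).keys = (List.range S.length).map (fun k => (k : Int)) := by
  intro S
  induction S using List.reverseRecOn with
  | nil => rfl
  | append_singleton S t ih =>
    rw [pvBBuild_append]
    have hnc : (pvBBuild oids m S).contains (S.length : Int) = false := by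
      rw [PySem.Dict.contains_eq_decide_mem_keys, ih]
      simp
    rw [PySem.Dict.keys_insert_of_not_contains, ih]
    case h => exact hnc
    simp [List.range_succ]

theorem pvSize_bBuild (oids : List Int) (m : List (Int × Int × Int)) (S : List Int) :
    (pvBBuild oids m S).size = S.length := by
  have h := pvKeys_bBuild oids m S
  have : (pvBBuild oids m S).keys.length = S.length := by rw [h]; simp
  simpa [PySem.Dict.size, PySem.Dict.keys] using this

theorem pvFind_congr {α : Type} (l : List α) (p q : α → Bool) (h : ∀ x ∈ l, p x = q x) :
    l.find? p = l.find? q := by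
  induction l with
  | nil => rfl
  | cons a l ih =>
    simp only [List.find?]
    rw [h a (by simp)]
    cases hq : q a with
    | true => rfl
    | false => exact ih (fun x hx => h x (by simp [hx]))

theorem pvFind_desc : ∀ (n : Nat) (a b c : Int), (a - b).toNat = n →
    (PySem.List.pyRange a b (-1)).find? (fun t => decide (t ≤ c)) =
      if b < min a c then some (min a c) else none := by
  intro n
  induction n with
  | zero =>
    intro a b c h
    have hab : a ≤ b := by omega
    rw [PySem.List.pyRange_neg_one_eq_nil hab]
    have : ¬ b < min a c := by have := min_le_left a c; omega
    simp [this]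
  | succ n ih =>
    intro a b c h
    have hba : b < a := by omega
    rw [PySem.List.pyRange_neg_one_cons hba]
    simp only [List.find?]
    by_cases hac : a ≤ c
    · have h1 : min a c = a := min_eq_left hac
      simp [hac, hba]
    · have h1 : min a c = c := min_eq_right (by omega)
      have h2 : min (a - 1) c = c := min_eq_right (by omega)
      have : (decide (a ≤ c)) = false := by simp [hac]
      rw [this, ih (a - 1) b c (by omega), h1, h2]

theorem pvFoldl_modify (m : List (Int × Int × Int)) (L : List Int) :
    ∀ (d0 : PySem.Dict Int (PySem.Dict Int (Int × Int))) (n : Int) (D : PySem.Dict Int (Int × Int)),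
      L.foldl (fun cl idx => cl.modify n PySem.Dict.empty
          (fun dd => dd.insert idx (pvLookup m idx))) (d0.insert n D)
        = d0.insert n (L.foldl (fun dd idx => dd.insert idx (pvLookup m idx)) D) := by
  induction L with
  | nil => intro d0 n D; rfl
  | cons a L ih =>
    intro d0 n D
    simp only [List.foldl_cons]
    have hstep : (d0.insert n D).modify n PySem.Dict.empty
        (fun dd => dd.insert a (pvLookup m a))
        = d0.insert n (D.insert a (pvLookup m a)) := by
      show (d0.insert n D).insert n (((d0.insert n D).getD n PySem.Dict.empty).insert a (pvLookup m a)) = _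
      rw [PySem.Dict.getD_insert_self, PySem.Dict.insert_insert_self]
    rw [hstep, ih]

theorem pvDictOf_append (m : List (Int × Int × Int)) (a b : List Int) :
    pvDictOf m (a ++ b) = b.foldl (fun dd idx => dd.insert idx (pvLookup m idx)) (pvDictOf m a) := by
  unfold pvDictOf
  rw [List.foldl_append]


theorem pvSlice_from_eq (oids : List Int) (i r : Int) (h0 : 0 ≤ i) (hr : i + r = (oids.length : Int)) :
    PySem.List.slice oids (some i) (some (i + r)) = PySem.List.slice oids (some i) none := by
  rw [PySem.List.slice_from oids h0, PySem.List.slice_toNat oids h0 (by omega)]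
  apply List.take_of_length_le
  simp only [List.length_drop]
  omega

theorem pvTail_eq (oids : List Int) (m : List (Int × Int × Int)) (p t rem : Int)
    (hp : 0 ≤ p) (ht : 1 ≤ t) (hrem : 0 < rem) (hsum : p + t + rem = (oids.length : Int)) :
    (PySem.List.slice oids (some (p + t)) none).foldl
        (fun dd idx => dd.insert idx (pvLookup m idx))
        (pvDictOf m (PySem.List.slice oids (some p) (some (p + t))))
      = pvDictOf m (PySem.List.slice oids (some p) (some (p + (t + rem)))) := by
  rw [PySem.List.slice_from oids (by omega : (0:Int) ≤ p + t),
    PySem.List.slice_toNat oids hp (by omega), PySem.List.slice_toNat oids hp (by omega)]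
  have e1 : (p + (t + rem)).toNat - p.toNat = t.toNat + rem.toNat := by omega
  have e2 : (p + t).toNat - p.toNat = t.toNat := by omega
  have e3 : oids.drop ((p + t).toNat) = (oids.drop p.toNat).drop t.toNat := by
    rw [List.drop_drop]; congr 1; omega
  rw [e1, e2, e3]
  have hlen : (oids.drop p.toNat).length ≤ t.toNat + rem.toNat := by
    simp only [List.length_drop]; omega
  rw [List.take_of_length_le hlen]
  conv_rhs => rw [← List.take_append_drop t.toNat (oids.drop p.toNat)]
  rw [pvDictOf_append]

theorem pvMainProof (oids : List Int) (m : List (Int × Int × Int)) (mn mx : Int)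
    (Hm : 1 ≤ mn ∨ 1 ≤ mx) :
    ∀ (fuel : Nat) (S : List Int), (∀ t ∈ S, 1 ≤ t) →
      pvALoop oids m mn mx fuel S.sum (S.length : Int) (pvBBuild oids m S)
        = pvBBuild oids m (pvBSizes mn mx fuel ((oids.length : Int) - S.sum) S) := by
  intro fuel
  induction fuel with
  | zero => intro S hS; rfl
  | succ fuel ih =>
    intro S hS
    have hsum : 0 ≤ S.sum := List.sum_nonneg (fun t ht => by have := hS t ht; omega)
    rw [pvALoop, pvBSizes]
    by_cases hlt : S.sum < (oids.length : Int)
    · rw [if_pos hlt, if_pos (by omega : (0:Int) < (oids.length : Int) - S.sum)]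
      by_cases hc1 : mn ≤ (oids.length : Int) - S.sum ∧ (oids.length : Int) - S.sum ≤ mx
      · rw [if_pos hc1, if_pos hc1, pvBBuild_append]
        rw [pvSlice_from_eq oids S.sum ((oids.length : Int) - S.sum) hsum (by omega)]
      · rw [if_neg hc1, if_neg hc1]
        by_cases hc2 : (oids.length : Int) - S.sum < mn
        · rw [if_pos hc2, if_pos hc2]
          cases S using List.reverseRecOn with
          | nil =>
            have hsz : (pvBBuild oids m ([] : List Int)).size = 0 := pvSize_bBuild oids m []
            rw [if_neg (by simp [hsz])]
            simp only [List.getLast?_nil]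
            have hb : pvBBuild oids m [((oids.length : Int) - 0)] =
                (pvBBuild oids m []).insert ((0:Nat) : Int)
                  (pvDictOf m (PySem.List.slice oids (some (List.sum ([] : List Int)))
                    (some (List.sum ([] : List Int) + ((oids.length : Int) - 0))))) := by
              have := pvBBuild_append oids m [] ((oids.length : Int) - 0)
              simpa using this
            simp only [List.sum_nil, List.length_nil] at *
            rw [hb]
            congr 1
            rw [pvSlice_from_eq oids 0 ((oids.length : Int) - 0) le_rfl (by omega)]
          | append_singleton S0 t =>
            have ht : 1 ≤ t := hS t (by simp)
            have hS0 : ∀ u ∈ S0, 1 ≤ u := fun u hu => hS u (by simp [hu])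
            have hp : 0 ≤ S0.sum := List.sum_nonneg (fun u hu => by have := hS0 u hu; omega)
            have hsz : (pvBBuild oids m (S0 ++ [t])).size ≠ 0 := by
              rw [pvSize_bBuild]; simp
            rw [if_pos hsz]
            rw [List.getLast?_concat]
            simp only [List.dropLast_concat]
            have hkey : ((S0 ++ [t]).length : Int) - 1 = (S0.length : Int) := by
              simp
            rw [hkey]
            simp only [List.sum_append, List.sum_cons, List.sum_nil, add_zero] at hlt ⊢
            rw [pvBBuild_append oids m S0 t]
            rw [pvFoldl_modify m]
            rw [pvBBuild_append oids m S0]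
            congr 1
            exact pvTail_eq oids m S0.sum t ((oids.length : Int) - (S0.sum + t)) hp ht
              (by omega) (by ring)
        · rw [if_neg hc2, if_neg hc2]
          have hgt : mx < (oids.length : Int) - S.sum := by omega
          have hmnle : mn ≤ (oids.length : Int) - S.sum := by omega
          have hcong : (PySem.List.pyRange mx (mn - 1) (-1)).find?
              (fun tam => decide (mn ≤ (oids.length : Int) - S.sum - tam ∨ (oids.length : Int) - S.sum - tam = 0))
            = (PySem.List.pyRange mx (mn - 1) (-1)).find?
              (fun tam => decide (tam ≤ (oids.length : Int) - S.sum - mn)) := by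
            apply pvFind_congr
            intro x hx
            rw [PySem.List.mem_pyRange_neg_one] at hx
            simp only [decide_eq_decide]
            omega
          rw [hcong, pvFind_desc ((mx - (mn - 1)).toNat) mx (mn - 1) ((oids.length : Int) - S.sum - mn) rfl]
          have hmin1 := min_le_left mx ((oids.length : Int) - S.sum - mn)
          have hmin2 := min_le_right mx ((oids.length : Int) - S.sum - mn)
          have hminc := min_choice mx ((oids.length : Int) - S.sum - mn)
          by_cases hge : min mx ((oids.length : Int) - S.sum - mn) < mn
          · rw [if_neg (by omega)]
            rw [if_pos hge]
          · rw [if_pos (by omega), if_neg hge]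
            have htam1 : 1 ≤ min mx ((oids.length : Int) - S.sum - mn) := by omega
            have hins : (pvBBuild oids m S).insert ((S.length : Int))
                (pvDictOf m (PySem.List.slice oids (some S.sum)
                  (some (S.sum + min mx ((oids.length : Int) - S.sum - mn)))))
              = pvBBuild oids m (S ++ [min mx ((oids.length : Int) - S.sum - mn)]) := by
              rw [pvBBuild_append]
            simp only []
            rw [hins]
            have ihS := ih (S ++ [min mx ((oids.length : Int) - S.sum - mn)])
              (by intro u hu; rcases List.mem_append.mp hu with h | h
                  · exact hS u h
                  · simp at h; omega)
            have hsum3 : (S ++ [min mx ((oids.length : Int) - S.sum - mn)]).sum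
                = S.sum + min mx ((oids.length : Int) - S.sum - mn) := by simp
            have hlen3 : (((S ++ [min mx ((oids.length : Int) - S.sum - mn)]).length : Nat) : Int)
                = (S.length : Int) + 1 := by simp
            rw [hsum3, hlen3] at ihS
            have harg : (oids.length : Int) - (S.sum + min mx ((oids.length : Int) - S.sum - mn))
                = (oids.length : Int) - S.sum - min mx ((oids.length : Int) - S.sum - mn) := by ring
            rw [harg] at ihS
            exact ihS
    · rw [if_neg hlt, if_neg (by omega : ¬ ((0:Int) < (oids.length : Int) - S.sum))]

-- ===== VERDICT (by name: the statement is the Claim_ definition above) =====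
theorem divide_ids_into_clusters_with_coords_spec : Claim_equal_divide_ids_into_clusters_with_coords := by
  intro oids m mn mx hDom hPre
  unfold Spec_divide_ids_into_clusters_with_coords
  unfold divide_ids_into_clusters_with_coords divide_ids_into_clusters_with_coords_alt
  have key : pvALoop oids m mn mx (oids.length + 1) 0 0 PySem.Dict.empty
      = pvBBuild oids m (pvBSizes mn mx (oids.length + 1) (oids.length : Int) []) := by
    have hBnil : pvBBuild oids m [] = PySem.Dict.empty := rfl
    rcases hPre.2 with h0 | hlt | ⟨hmx, _⟩
    · have hnil : oids = [] := List.eq_nil_of_length_eq_zero (by exact_mod_cast h0)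
      subst hnil
      rfl
    · have Hm : 1 ≤ mn ∨ 1 ≤ mx := Or.inl (by
        have : (0:Int) ≤ (oids.length : Int) := by positivity
        omega)
      have := pvMainProof oids m mn mx Hm (oids.length + 1) [] (by simp)
      simpa using this
    · have := pvMainProof oids m mn mx (Or.inr hmx) (oids.length + 1) [] (by simp)
      simpa using this
  rw [key]
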